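-- pv_equiv track=rewrite | github.com/JaeguKim/ROAD-TO-BLUE-CODER | Programmers/november_contest/3.py | solution
-- ===== SOURCE A (Python) =====
-- from collections import Counter
--
-- def solution(a):
--     cDict = Counter(a)
--     maxCnt = -1
--     for k in cDict:
--         if cDict[k] <= maxCnt:
--             continue
--         i=0
--         cnt=0
--         while i < len(a)-1:
--             if (a[i] != k and a[i+1] != k) or a[i]==a[i+1]:
--                 i+=1
--                 continue
--             cnt+=1
--             i+=2
--         maxCnt = max(maxCnt,cnt)
--     if maxCnt == -1:
--         return 0
--     return maxCnt*2
-- ===== SOURCE B (Python) =====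
-- def solution(a):
--     n = len(a)
--     occ = {}
--     for j, v in enumerate(a):
--         occ.setdefault(v, []).append(j)
--     best = 0
--     for k, ps in occ.items():
--         i = 0
--         cnt = 0
--         for p in ps:
--             if p < i:
--                 continue
--             if p > i:
--                 cnt += 1
--                 i = p + 1
--             elif p + 1 < n and a[p + 1] != k:
--                 cnt += 1
--                 i = p + 2
--             else:
--                 i = p + 1
--         best = max(best, cnt)
--     return best * 2
-- ===== Notes on version B (the rewrite author's own statement) =====
-- stated objective: faster
-- what changed: A rescans the whole list with the greedy pair loop once per distinct value; B builds one value-to-occurrence-indices dictionary in a single pass and then simulates the greedy pairing per value by jumping over the non-occurrence stretches, touching only that value's occurrences.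
import Mathlib
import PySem

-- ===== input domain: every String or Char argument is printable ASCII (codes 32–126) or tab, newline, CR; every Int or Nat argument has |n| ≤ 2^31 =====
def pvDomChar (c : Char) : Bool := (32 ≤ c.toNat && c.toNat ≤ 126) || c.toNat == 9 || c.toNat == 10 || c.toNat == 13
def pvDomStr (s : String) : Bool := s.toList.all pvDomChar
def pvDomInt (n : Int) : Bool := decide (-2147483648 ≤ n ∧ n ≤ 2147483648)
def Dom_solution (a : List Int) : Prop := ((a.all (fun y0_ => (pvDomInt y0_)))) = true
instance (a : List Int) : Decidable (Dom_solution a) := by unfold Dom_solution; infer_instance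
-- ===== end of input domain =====

-- B replaces A's per-distinct-value rescan of the whole list by one grouping pass (value → ascending
-- occurrence indices) followed by a jump simulation of the greedy pairing over each occurrence list.

-- ===== PORT A =====
-- A's inner while loop for a fixed key k.  Indices i and i+1 are in range whenever read
-- (the loop guard is i < len(a)-1), so List.getD is exact for Python's a[i] here.
def solutionLoopA (a : List Int) (k : Int) (i : Nat) (cnt : Int) : Int :=
  if i + 1 < a.length then
    if (a.getD i 0 ≠ k ∧ a.getD (i+1) 0 ≠ k) ∨ a.getD i 0 = a.getD (i+1) 0 then
      solutionLoopA a k (i+1) cnt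
    else
      solutionLoopA a k (i+2) (cnt+1)
  else cnt
termination_by a.length - i

def solution (a : List Int) : Int :=
  let cDict := PySem.Dict.counter a
  let maxCnt := cDict.keys.foldl
    (fun m k => if cDict.getD k 0 ≤ m then m else max m (solutionLoopA a k 0 0)) (-1)
  if maxCnt = -1 then 0 else maxCnt * 2

-- ===== PORT B =====
-- one step of B's inner for-loop over the next occurrence p of key k; state = (i, cnt)
def solutionStepB (a : List Int) (k : Int) (s : Int × Int) (p : Int) : Int × Int :=
  if p < s.1 then s
  else if p > s.1 then (p + 1, s.2 + 1)
  else if p + 1 < (a.length : Int) ∧ PySem.List.pyGetD a (p + 1) 0 ≠ k then (p + 2, s.2 + 1)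
  else (p + 1, s.2)

def solution_alt (a : List Int) : Int :=
  let occ := (PySem.List.enumerate a 0).foldl
    (fun d p => d.modify p.2 ([] : List Int) (· ++ [p.1])) PySem.Dict.empty
  let best := occ.items.foldl
    (fun best kps => max best (kps.2.foldl (solutionStepB a kps.1) (0, 0)).2) 0
  best * 2

-- ===== PRECONDITION & SPEC =====
def Spec_solution (a : List Int) (out : Int) : Prop := out = solution_alt a
instance (a : List Int) (out : Int) : Decidable (Spec_solution a out) := by unfold Spec_solution; infer_instance

-- ===== CLAIM (what is proved, stated in full; the proofs are below) =====
def Claim_equal_solution : Prop := ∀ (a : List Int), Dom_solution a → Spec_solution a (solution a)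

-- ===== LEMMAS AND PROOFS =====

-- proof-side model of B's inner loop, over Nat positions
def simN (a : List Int) (k : Int) : List Nat → Nat → Int → Int
  | [], _, cnt => cnt
  | p :: ps, i, cnt =>
    if p < i then simN a k ps i cnt
    else if i < p then simN a k ps (p+1) (cnt+1)
    else if p + 1 < a.length ∧ a.getD (p+1) 0 ≠ k then simN a k ps (p+2) (cnt+1)
    else simN a k ps (p+1) cnt

-- the ascending list of positions of k in a
def kposN (a : List Int) (k : Int) : List Nat :=
  (List.range a.length).filter (fun j => a.getD j 0 == k)

theorem kposN_sorted (a : List Int) (k : Int) : (kposN a k).Sorted (· < ·) :=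
  List.Pairwise.filter _ List.pairwise_lt_range

theorem kposN_mem (a : List Int) (k : Int) (q : Nat) :
    q ∈ kposN a k ↔ (q < a.length ∧ a.getD q 0 = k) := by
  simp [kposN, List.mem_filter, List.mem_range]

theorem kposN_cons (x : Int) (xs : List Int) (k : Int) :
    kposN (x :: xs) k = (if x = k then [0] else []) ++ (kposN xs k).map Nat.succ := by
  simp only [kposN, List.length_cons, List.range_succ_eq_map, List.filter_cons, List.filter_map,
    List.getD_cons_zero, Function.comp_def, List.getD_cons_succ]
  by_cases hx : x = k <;> simp [hx]

theorem kposN_length (a : List Int) (k : Int) : (kposN a k).length = a.count k := by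
  induction a with
  | nil => simp [kposN]
  | cons x xs ih =>
    rw [kposN_cons, List.length_append, List.length_map, ih, List.count_cons]
    by_cases hx : x = k <;> simp [hx] <;> omega

-- A's loop returns cnt when no occurrence of k lies at or after i
theorem loopA_none (a : List Int) (k : Int) (i : Nat) (cnt : Int)
    (h : ∀ q, i ≤ q → q < a.length → a.getD q 0 ≠ k) :
    solutionLoopA a k i cnt = cnt := by
  rw [solutionLoopA]
  split
  · next hlt =>
    rw [if_pos (Or.inl ⟨h i (Nat.le_refl i) (by omega), h (i+1) (by omega) hlt⟩)]
    exact loopA_none a k (i+1) cnt (fun q hq hq' => h q (by omega) hq')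
  · rfl
termination_by a.length - i

-- A's loop jumps from i straight past the first occurrence p > i, counting one pair
theorem loopA_jump (a : List Int) (k : Int) (i p : Nat) (cnt : Int)
    (hip : i < p) (hp : p < a.length) (hpk : a.getD p 0 = k)
    (hgap : ∀ q, i ≤ q → q < p → a.getD q 0 ≠ k) :
    solutionLoopA a k i cnt = solutionLoopA a k (p+1) (cnt+1) := by
  rw [solutionLoopA]
  have hi1 : i + 1 < a.length := by omega
  rw [if_pos hi1]
  by_cases hpe : i + 1 = p
  · have hik : a.getD i 0 ≠ k := hgap i (Nat.le_refl i) hip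
    have hik1 : a.getD (i+1) 0 = k := by rw [hpe]; exact hpk
    rw [if_neg (by
      rintro (⟨_, h2'⟩ | he)
      · exact h2' hik1
      · exact hik (he.trans hik1))]
    have h2 : i + 2 = p + 1 := by omega
    rw [h2]
  · have h1 : a.getD i 0 ≠ k := hgap i (Nat.le_refl i) hip
    have h2 : a.getD (i+1) 0 ≠ k := hgap (i+1) (by omega) (by omega)
    rw [if_pos (Or.inl ⟨h1, h2⟩)]
    exact loopA_jump a k (i+1) p cnt (by omega) hp hpk (fun q hq hq' => hgap q (by omega) hq')
termination_by p - i

-- main correspondence: A's index scan equals the occurrence-list simulation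
theorem loopA_eq_simN (a : List Int) (k : Int) (ps : List Nat) (b i : Nat) (cnt : Int)
    (hsort : ps.Sorted (· < ·))
    (hmem : ∀ q, q ∈ ps ↔ (b ≤ q ∧ q < a.length ∧ a.getD q 0 = k))
    (hbi : b ≤ i)
    (hgap : ∀ q, b ≤ q → q < i → a.getD q 0 ≠ k) :
    solutionLoopA a k i cnt = simN a k ps i cnt := by
  induction ps generalizing b i cnt with
  | nil =>
    rw [simN]
    exact loopA_none a k i cnt (fun q hq hq' hk =>
      by simpa using (hmem q).mpr ⟨Nat.le_trans hbi hq, hq', hk⟩)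
  | cons p ps ih =>
    obtain ⟨hbp, hplen, hpk⟩ := (hmem p).mp (List.mem_cons_self)
    rw [List.sorted_cons] at hsort
    obtain ⟨hlt, hsort'⟩ := hsort
    have hmem' : ∀ q, q ∈ ps ↔ (p + 1 ≤ q ∧ q < a.length ∧ a.getD q 0 = k) := by
      intro q
      constructor
      · intro hq
        obtain ⟨_, h2, h3⟩ := (hmem q).mp (List.mem_cons_of_mem _ hq)
        exact ⟨hlt q hq, h2, h3⟩
      · rintro ⟨h1, h2, h3⟩
        have := (hmem q).mpr ⟨by omega, h2, h3⟩
        rcases List.mem_cons.mp this with h | h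
        · exfalso; omega
        · exact h
    have hip : i ≤ p := by
      by_contra h
      exact hgap p hbp (by omega) hpk
    rcases Nat.lt_or_ge i p with hlti | hgei
    · -- i < p : jump
      rw [simN, if_neg (by omega), if_pos hlti]
      rw [loopA_jump a k i p cnt hlti hplen hpk
        (fun q hq hq' hk => by
          have := (hmem q).mpr ⟨Nat.le_trans hbi hq, by omega, hk⟩
          rcases List.mem_cons.mp this with h | h
          · exfalso; omega
          · exact absurd (hlt q h) (by omega))]
      exact ih (p+1) (p+1) (cnt+1) hsort' hmem' (Nat.le_refl _) (fun q h1 h2 => by exfalso; omega)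
    · -- i = p
      have hie : i = p := by omega
      subst hie
      by_cases hc : i + 1 < a.length ∧ a.getD (i+1) 0 ≠ k
      · rw [simN, if_neg (by omega), if_neg (by omega), if_pos hc]
        rw [solutionLoopA, if_pos hc.1, if_neg (by
          rintro (⟨h1', _⟩ | he)
          · exact h1' hpk
          · exact hc.2 (he.symm.trans hpk))]
        exact ih (i+1) (i+2) (cnt+1) hsort' hmem'
          (by omega) (fun q h1 h2 => by
            have hq : q = i + 1 := by omega
            subst hq
            exact hc.2)
      · rw [simN, if_neg (by omega), if_neg (by omega), if_neg hc]
        by_cases hl : i + 1 < a.length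
        · have hk1 : a.getD (i+1) 0 = k := by
            by_contra hne; exact hc ⟨hl, hne⟩
          rw [solutionLoopA, if_pos hl, if_pos (Or.inr (by rw [hpk, hk1]))]
          exact ih (i+1) (i+1) cnt hsort' hmem' (Nat.le_refl _) (fun q h1 h2 => by exfalso; omega)
        · have hps : ps = [] := by
            rw [List.eq_nil_iff_forall_not_mem]
            intro q hq
            obtain ⟨h1, h2, _⟩ := (hmem' q).mp hq
            omega
          rw [hps, simN, solutionLoopA, if_neg hl]
  
-- simN never decreases cnt
theorem simN_ge (a : List Int) (k : Int) (ps : List Nat) :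
    ∀ i cnt, cnt ≤ simN a k ps i cnt := by
  induction ps with
  | nil => intro i cnt; rw [simN]
  | cons p ps ih =>
    intro i cnt
    rw [simN]
    split
    · exact ih i cnt
    · split
      · exact le_trans (by omega) (ih (p+1) (cnt+1))
      · split
        · exact le_trans (by omega) (ih (p+2) (cnt+1))
        · exact ih (p+1) cnt

-- simN adds at most one per occurrence
theorem simN_le (a : List Int) (k : Int) (ps : List Nat) :
    ∀ i cnt, simN a k ps i cnt ≤ cnt + ps.length := by
  induction ps with
  | nil => intro i cnt; rw [simN]; simp
  | cons p ps ih =>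
    intro i cnt
    rw [simN]
    have h1 := ih i cnt
    have h2 := ih (p+1) (cnt+1)
    have h3 := ih (p+2) (cnt+1)
    have h4 := ih (p+1) cnt
    split
    · simp only [List.length_cons]; push_cast; omega
    · split
      · simp only [List.length_cons]; push_cast at *; omega
      · split
        · simp only [List.length_cons]; push_cast at *; omega
        · simp only [List.length_cons]; push_cast at *; omega

-- B's Int-state fold over the cast positions computes simN
theorem foldB_eq_simN (a : List Int) (k : Int) (ps : List Nat) :
    ∀ (i : Nat) (cnt : Int),
      ((ps.map (Int.ofNat)).foldl (solutionStepB a k) ((i : Int), cnt)).2 = simN a k ps i cnt := by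
  induction ps with
  | nil => intro i cnt; simp [simN]
  | cons p ps ih =>
    intro i cnt
    rw [List.map_cons, List.foldl_cons, simN, solutionStepB]
    simp only [Int.ofNat_eq_natCast]
    by_cases h1 : p < i
    · rw [if_pos (by exact_mod_cast h1), if_pos h1]
      exact ih i cnt
    · rw [if_neg (by exact_mod_cast h1), if_neg h1]
      by_cases h2 : i < p
      · rw [if_pos (by exact_mod_cast h2), if_pos h2]
        have := ih (p+1) (cnt+1)
        push_cast at this ⊢
        exact this
      · rw [if_neg (by exact_mod_cast h2), if_neg h2]
        have hpg : PySem.List.pyGetD a ((p:Int) + 1) 0 = a.getD (p+1) 0 := by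
          have := PySem.List.pyGetD_natCast a (p+1) 0
          push_cast at this
          exact this
        by_cases h3 : p + 1 < a.length ∧ a.getD (p+1) 0 ≠ k
        · rw [if_pos (⟨by exact_mod_cast h3.1, by rw [hpg]; exact h3.2⟩ :
              (p : Int) + 1 < (a.length : Int) ∧ PySem.List.pyGetD a ((p : Int) + 1) 0 ≠ k), if_pos h3]
          have := ih (p+2) (cnt+1)
          push_cast at this ⊢
          exact this
        · rw [if_neg (by
            intro hcon
            exact h3 ⟨by exact_mod_cast hcon.1, by rw [hpg] at hcon; exact hcon.2⟩), if_neg h3]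
          have := ih (p+1) cnt
          push_cast at this ⊢
          exact this

-- the Int position list B stores for key k is the cast of kposN
theorem enum_filter_eq_kposN_aux (a : List Int) (k : Int) :
    ∀ (s : Nat),
      ((PySem.List.enumerate a (s : Int)).filter (fun p => p.2 == k)).map (·.1)
        = (kposN a k).map (fun j => ((s + j : Nat) : Int)) := by
  induction a with
  | nil => intro s; simp [kposN, PySem.List.enumerate]
  | cons x xs ih =>
    intro s
    rw [PySem.List.enumerate_cons, kposN_cons]
    have ihs : ((PySem.List.enumerate xs ((s : Int) + 1)).filter (fun p => p.2 == k)).map (·.1)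
        = (kposN xs k).map (fun j => ((s + 1 + j : Nat) : Int)) := by
      have := ih (s + 1)
      push_cast at this ⊢
      exact this
    have htail : ((kposN xs k).map Nat.succ).map (fun j => ((s + j : Nat) : Int))
        = (kposN xs k).map (fun j => ((s + 1 + j : Nat) : Int)) := by
      rw [List.map_map]
      apply List.map_congr_left
      intro j _
      simp only [Function.comp_apply, Nat.succ_eq_add_one]
      push_cast
      ring
    rw [List.map_append, htail]
    by_cases hx : x = k
    · rw [List.filter_cons_of_pos (by simp [hx]), List.map_cons, if_pos hx, ihs]
      simp
    · rw [List.filter_cons_of_neg (by simp [hx]), if_neg hx, ihs]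
      simp

theorem enum_filter_eq_kposN (a : List Int) (k : Int) :
    ((PySem.List.enumerate a 0).filter (fun p => p.2 == k)).map (·.1)
      = (kposN a k).map Int.ofNat := by
  have := enum_filter_eq_kposN_aux a k 0
  norm_num at this
  rw [this]
  simp

-- B's occurrence dictionary, characterised
theorem occ_getD (a : List Int) (k : Int) :
    (((PySem.List.enumerate a 0).foldl
        (fun d p => d.modify p.2 ([] : List Int) (· ++ [p.1])) PySem.Dict.empty).getD k [])
      = (kposN a k).map Int.ofNat := by
  rw [show ((PySem.List.enumerate a 0).foldl
        (fun d p => d.modify p.2 ([] : List Int) (· ++ [p.1])) PySem.Dict.empty)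
      = (((PySem.List.enumerate a 0).map Prod.swap).foldl
        (fun d p => d.modify p.1 ([] : List Int) (· ++ [p.2])) PySem.Dict.empty) from by
    rw [List.foldl_map]
    rfl]
  rw [PySem.Dict.getD_foldl_modify_append, PySem.Dict.getD_empty, List.nil_append]
  rw [List.filter_map, List.map_map]
  rw [show ((fun (p : Int × Int) => p.1 == k) ∘ Prod.swap) = (fun (p : Int × Int) => p.2 == k) from rfl]
  rw [show ((fun (x : Int × Int) => x.2) ∘ Prod.swap) = (fun (x : Int × Int) => x.1) from rfl]
  exact enum_filter_eq_kposN a k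

theorem occ_keys (a : List Int) :
    (((PySem.List.enumerate a 0).foldl
        (fun d p => d.modify p.2 ([] : List Int) (· ++ [p.1])) PySem.Dict.empty)).keys
      = PySem.Set.ofList a := by
  rw [show ((PySem.List.enumerate a 0).foldl
        (fun d p => d.modify p.2 ([] : List Int) (· ++ [p.1])) PySem.Dict.empty)
      = (((PySem.List.enumerate a 0).map Prod.swap).foldl
        (fun d p => d.modify p.1 ([] : List Int) (· ++ [p.2])) PySem.Dict.empty) from by
    rw [List.foldl_map]
    rfl]
  rw [show (((PySem.List.enumerate a 0).map Prod.swap).foldl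
        (fun d p => d.modify p.1 ([] : List Int) (· ++ [p.2])) PySem.Dict.empty)
      = (((PySem.List.enumerate a 0).map Prod.swap).foldl
        (fun d p => d.modify (Prod.fst p) ([] : List Int) ((fun (_ : PySem.Dict Int (List Int)) (p : Int × Int) (l : List Int) => l ++ [p.2]) d p)) PySem.Dict.empty) from rfl]
  rw [PySem.Dict.keys_foldl_modify_key]
  rw [PySem.Dict.keys_empty, List.map_map]
  rw [show (Prod.fst ∘ (Prod.swap : Int × Int → Int × Int)) = (fun p => p.2) from rfl]
  rw [PySem.List.map_snd_enumerate]
  simp [PySem.Set.update, PySem.Set.ofList]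

theorem occ_keys_nodup (a : List Int) :
    (((PySem.List.enumerate a 0).foldl
        (fun d p => d.modify p.2 ([] : List Int) (· ++ [p.1])) PySem.Dict.empty)).keys.Nodup := by
  rw [occ_keys]
  exact PySem.Set.nodup_ofList a

-- the per-key count both programs compute
theorem cnt_le_count (a : List Int) (k : Int) :
    simN a k (kposN a k) 0 0 ≤ (a.count k : Int) := by
  have := simN_le a k (kposN a k) 0 0
  rw [kposN_length] at this
  simpa using this

theorem cnt_nonneg (a : List Int) (k : Int) : 0 ≤ simN a k (kposN a k) 0 0 :=
  simN_ge a k (kposN a k) 0 0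

theorem foldl_max_ge (c : Int → Int) (K : List Int) :
    ∀ m : Int, m ≤ K.foldl (fun m k => max m (c k)) m := by
  induction K with
  | nil => intro m; simp
  | cons k K ih =>
    intro m
    exact le_trans (le_max_left m (c k)) (ih (max m (c k)))

theorem solution_eq_alt (a : List Int) : solution a = solution_alt a := by
  have hA : solution a
      = (if (PySem.Set.ofList a).foldl
            (fun m k => max m (simN a k (kposN a k) 0 0)) (-1) = -1 then 0
         else ((PySem.Set.ofList a).foldl
            (fun m k => max m (simN a k (kposN a k) 0 0)) (-1)) * 2) := by
    rw [solution]
    have hf : (fun (m : Int) (k : Int) =>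
          if (PySem.Dict.counter a).getD k 0 ≤ m then m else max m (solutionLoopA a k 0 0))
        = (fun (m : Int) (k : Int) => max m (simN a k (kposN a k) 0 0)) := by
      funext m k
      rw [PySem.Dict.getD_counter]
      rw [loopA_eq_simN a k (kposN a k) 0 0 0 (kposN_sorted a k)
        (fun q => by simpa using kposN_mem a k q) (Nat.le_refl 0) (fun q h1 h2 => by exfalso; omega)]
      split
      · next h => exact (max_eq_left (le_trans (cnt_le_count a k) h)).symm
      · rfl
    rw [PySem.Dict.keys_counter, hf]
  have hB : solution_alt a
      = ((PySem.Set.ofList a).foldl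
            (fun m k => max m (simN a k (kposN a k) 0 0)) 0) * 2 := by
    rw [solution_alt]
    have hocc := occ_keys_nodup a
    rw [PySem.Dict.items_eq_map_keys _ hocc ([] : List Int), List.foldl_map, occ_keys]
    congr 1
    show (PySem.Set.ofList a).foldl (fun m k =>
        max m (((((PySem.List.enumerate a 0).foldl
            (fun d p => d.modify p.2 ([] : List Int) (· ++ [p.1])) PySem.Dict.empty).getD k
          []).foldl (solutionStepB a k) (0, 0)).2)) 0
      = (PySem.Set.ofList a).foldl (fun m k => max m (simN a k (kposN a k) 0 0)) 0
    have h00 : ((0 : Int), (0 : Int)) = (((0 : Nat) : Int), (0 : Int)) := by norm_num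
    have hfun : (fun (m : Int) (k : Int) =>
        max m (((((PySem.List.enumerate a 0).foldl
            (fun d p => d.modify p.2 ([] : List Int) (· ++ [p.1])) PySem.Dict.empty).getD k
          []).foldl (solutionStepB a k) (0, 0)).2))
        = (fun (m : Int) (k : Int) => max m (simN a k (kposN a k) 0 0)) := by
      funext m k
      rw [occ_getD a k, h00, foldB_eq_simN a k (kposN a k) 0 0]
    rw [hfun]
  rcases hK : (PySem.Set.ofList a : List Int) with _ | ⟨k, K⟩
  · rw [hA, hB, hK]
    norm_num
  · rw [hA, hB, hK]
    simp only [List.foldl_cons]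
    have hc0 : (0 : Int) ≤ simN a k (kposN a k) 0 0 := cnt_nonneg a k
    have hmax : max (-1 : Int) (simN a k (kposN a k) 0 0)
        = max (0 : Int) (simN a k (kposN a k) 0 0) := by omega
    rw [hmax]
    have hge : (max (0 : Int) (simN a k (kposN a k) 0 0))
        ≤ K.foldl (fun m k => max m (simN a k (kposN a k) 0 0))
            (max (0 : Int) (simN a k (kposN a k) 0 0)) :=
      foldl_max_ge (fun k => simN a k (kposN a k) 0 0) K _
    rw [if_neg (by omega)]

-- ===== VERDICT (by name: the statement is the Claim_ definition above) =====
theorem solution_spec : Claim_equal_solution := by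
  intro a _
  unfold Spec_solution
  exact solution_eq_alt a
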